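-- pv_equiv track=rewrite | github.com/Psyhe/Single_Source_Shortest_Paths | rmat_new_script.py | shard_vertices
-- ===== SOURCE A (Python) =====
-- def shard_vertices(n, k):
--     base = n // k
--     rem = n % k
--     shards = []
--     start = 0
--     for i in range(k):
--         size = base + (1 if i < rem else 0)
--         end = start + size - 1
--         shards.append((start, end))
--         start = end + 1
--     return shards
-- ===== SOURCE B (Python) =====
-- def shard_vertices(n, k):
--     base = n // k
--     rem = n % k
--     return [(i * base + min(i, rem), (i + 1) * base + min(i + 1, rem) - 1)
--             for i in range(k)]
-- ===== Notes on version B (the rewrite author's own statement) =====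
-- stated objective: alternative
-- what changed: Replaces the running start/end accumulator loop with a closed-form per-index map: shard i's bounds are computed directly as (i*base + min(i,rem), (i+1)*base + min(i+1,rem) - 1), eliminating all carried state.
import Mathlib
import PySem

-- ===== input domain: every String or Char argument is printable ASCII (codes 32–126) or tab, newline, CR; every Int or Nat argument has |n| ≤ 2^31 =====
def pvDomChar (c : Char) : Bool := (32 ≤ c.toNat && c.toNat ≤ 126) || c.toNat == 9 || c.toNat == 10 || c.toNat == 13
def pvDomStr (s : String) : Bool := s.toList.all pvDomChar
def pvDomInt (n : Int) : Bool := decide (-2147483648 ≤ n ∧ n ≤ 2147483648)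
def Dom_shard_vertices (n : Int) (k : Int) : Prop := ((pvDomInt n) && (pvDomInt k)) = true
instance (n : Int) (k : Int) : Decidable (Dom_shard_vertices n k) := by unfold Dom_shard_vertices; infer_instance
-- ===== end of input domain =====

-- B replaces A's running start/end accumulator with a closed-form per-index formula (alternative decomposition, same O(k) cost).


-- ===== PORT A =====
def shard_vertices (n : Int) (k : Int) : List (Int × Int) :=
  let base := PySem.Int.floordiv n k
  let rem := PySem.Int.mod n k
  ((PySem.List.pyRange 0 k 1).foldl
    (fun (st : List (Int × Int) × Int) i =>
      let size := base + (if i < rem then (1:Int) else 0)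
      let e := st.2 + size - 1
      (st.1 ++ [(st.2, e)], e + 1))
    ([], 0)).1

-- ===== PORT B =====
def shard_vertices_alt (n : Int) (k : Int) : List (Int × Int) :=
  let base := PySem.Int.floordiv n k
  let rem := PySem.Int.mod n k
  (PySem.List.pyRange 0 k 1).map
    (fun i => (i * base + min i rem, (i + 1) * base + min (i + 1) rem - 1))

-- ===== PRECONDITION & SPEC =====
-- Python A raises ZeroDivisionError when k = 0; B does too, so k = 0 is excluded.
def Pre_shard_vertices (n : Int) (k : Int) : Prop := k ≠ 0
instance (n : Int) (k : Int) : Decidable (Pre_shard_vertices n k) := by unfold Pre_shard_vertices; infer_instance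
def pvWitness_shard_vertices : Int × Int := (10, 3)

def Spec_shard_vertices (n : Int) (k : Int) (out : List (Int × Int)) : Prop := out = shard_vertices_alt n k
instance (n : Int) (k : Int) (out : List (Int × Int)) : Decidable (Spec_shard_vertices n k out) := by unfold Spec_shard_vertices; infer_instance

-- ===== CLAIM (what is proved, stated in full; the proofs are below) =====
def Claim_equal_shard_vertices : Prop := ∀ (n : Int) (k : Int), Dom_shard_vertices n k → Pre_shard_vertices n k → Spec_shard_vertices n k (shard_vertices n k)

-- ===== LEMMAS AND PROOFS =====

-- Loop invariant: starting the fold at index a with start value a*base + min a rem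
-- appends exactly the closed-form shards for indices a..b-1.
lemma shard_loop (base rem : Int) :
    ∀ (m : Nat) (a b : Int) (acc : List (Int × Int)), (b - a).toNat = m →
    ((PySem.List.pyRange a b 1).foldl
      (fun (st : List (Int × Int) × Int) i =>
        let size := base + (if i < rem then (1:Int) else 0)
        let e := st.2 + size - 1
        (st.1 ++ [(st.2, e)], e + 1))
      (acc, a * base + min a rem)).1
    = acc ++ (PySem.List.pyRange a b 1).map
        (fun i => (i * base + min i rem, (i + 1) * base + min (i + 1) rem - 1)) := by
  intro m
  induction m with
  | zero =>
    intro a b acc h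
    have hba : b ≤ a := by omega
    simp [PySem.List.pyRange_one_eq_nil hba]
  | succ m ih =>
    intro a b acc h
    have hab : a < b := by omega
    rw [PySem.List.pyRange_one_cons hab]
    simp only [List.foldl_cons, List.map_cons]
    have hstart : a * base + min a rem + (base + (if a < rem then (1:Int) else 0))
        = (a + 1) * base + min (a + 1) rem := by
      have hmin : min a rem + (if a < rem then (1:Int) else 0) = min (a + 1) rem := by
        split_ifs <;> omega
      linear_combination hmin
    have hend : a * base + min a rem + (base + (if a < rem then (1:Int) else 0)) - 1
        = (a + 1) * base + min (a + 1) rem - 1 := by omega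
    have := ih (a + 1) b (acc ++ [(a * base + min a rem,
        (a + 1) * base + min (a + 1) rem - 1)]) (by omega)
    simp only [List.append_assoc, List.singleton_append] at this ⊢
    simpa [hstart, hend] using this

lemma mod_nonneg_of_pos (n k : Int) (hk : 0 < k) : 0 ≤ PySem.Int.mod n k := by
  exact PySem.Int.mod_nonneg n hk

-- ===== VERDICT (by name: the statement is the Claim_ definition above) =====
theorem shard_vertices_spec : Claim_equal_shard_vertices := by
  intro n k _ hk
  unfold Spec_shard_vertices shard_vertices shard_vertices_alt
  rcases lt_or_gt_of_ne hk with hneg | hpos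
  · have : k ≤ 0 := le_of_lt hneg
    simp [PySem.List.pyRange_one_eq_nil this]
  · have hrem : 0 ≤ PySem.Int.mod n k := mod_nonneg_of_pos n k hpos
    have := shard_loop (PySem.Int.floordiv n k) (PySem.Int.mod n k) k.toNat 0 k [] (by omega)
    simpa [min_eq_left hrem] using this
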